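-- pv_equiv track=rewrite | github.com/barszu/ASD | nauka2/do_egzaminu/2023/kolos uzupelniajacy/kolu.py | ice_cream
-- ===== SOURCE A (Python) =====
-- def quickselect(A, l, p, k):  # O(n)
--     def partition(A, l, p):
--         x = A[p]
--         i = l - 1
--         for j in range(l, p):
--             if A[j] > x:
--                 i += 1
--                 A[i], A[j] = A[j], A[i]
--         A[i + 1], A[p] = A[p], A[i + 1]
--         return i + 1
--
--     if l == p: return A[l]
--     q = partition(A, l, p)
--     if q == k: return A[q]
--     if q < k: return quickselect(A, q + 1, p, k)
--     else: return quickselect(A, l, q - 1, k)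
--
-- def ice_cream(T):  # O(nlogn) ? XD
--     # potrzeba nam znalezc k-ty najwiekszy element taki ze T[k] - k <= 0
--     # i od tego momentu reszte odrzucamy
--
--     # k element znajdujemy wstrzeliwujac sie binsearchem
--     n = len(T)
--     l = 0
--     r = n
--     while l < r:
--         k = (l + r) // 2
--         # znajdz m-ty najwiekszy element
--         x = quickselect(T, 0, n-1, k)
--
--         if x - k <= 0:
--             r = k
--         else:
--             l = k + 1
--     return sum(T[:l]) - sum([i for i in range(l)])
-- ===== SOURCE B (Python) =====
-- def ice_cream(T):
--     # O(n) bucket/h-index algorithm: find l = least k with #{v in T : v > k} <= k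
--     # via clamped counting buckets, then sum the top-l elements by one value pass.
--     # (Unlike A, does not reorder T in place; return value is identical.)
--     n = len(T)
--     cnt = [0] * (n + 1)
--     for v in T:
--         if v >= 1:
--             cnt[v if v < n else n] += 1
--     l = n
--     g = 0
--     for k in range(n - 1, -1, -1):
--         g += cnt[k + 1]
--         if g <= k:
--             l = k
--     s = 0
--     m = 0
--     for v in T:
--         if v > l:
--             s += v
--             m += 1
--     return s + (l - m) * l - l * (l - 1) // 2
-- ===== Notes on version B (the rewrite author's own statement) =====
-- stated objective: faster
-- what changed: Replaces A's binary search over repeated in-place quickselects (and its final slice-sum) by a single clamped counting-bucket pass that locates the h-index-style crossing l in O(n), plus one value pass summing elements above l; B also leaves T unmutated while A partially sorts it in place (return values identical).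
import Mathlib
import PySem

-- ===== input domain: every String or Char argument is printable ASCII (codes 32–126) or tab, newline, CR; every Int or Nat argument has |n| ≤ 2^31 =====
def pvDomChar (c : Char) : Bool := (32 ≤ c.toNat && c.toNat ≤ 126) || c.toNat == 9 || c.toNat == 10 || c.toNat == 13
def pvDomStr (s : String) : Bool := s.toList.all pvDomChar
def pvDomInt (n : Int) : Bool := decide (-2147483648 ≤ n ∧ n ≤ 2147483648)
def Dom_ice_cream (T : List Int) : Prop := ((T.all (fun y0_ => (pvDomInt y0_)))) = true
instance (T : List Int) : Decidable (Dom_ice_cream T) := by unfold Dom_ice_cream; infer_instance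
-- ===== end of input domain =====

-- B replaces A's binary search over repeated in-place quickselects by an O(n) counting-bucket
-- pass (objective: faster). A partially sorts its argument in place; B does not mutate it; the
-- equivalence proved here is about the return value only.

-- ===== PORT A =====
-- A[i], A[j] = A[j], A[i]
def pvSwap (A : List Int) (i j : Nat) : List Int :=
  (A.set i (A.getD j 0)).set j (A.getD i 0)

-- A's inner 'partition'; the accumulator's second component is Python's i+1 (kept as a Nat,
-- Python's i starts at l-1 and is only ever used as i+1); returns (array, i+1).
def pvPartition (A : List Int) (l p : Nat) : List Int × Nat :=
  let x := A.getD p 0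
  let s := (List.range' l (p - l)).foldl
    (fun (s : List Int × Nat) j => if x < s.1.getD j 0 then (pvSwap s.1 s.2 j, s.2 + 1) else s)
    (A, l)
  (pvSwap s.1 s.2 p, s.2)

-- 'quickselect' (mutates A, so the array is threaded through); fuel makes the recursion
-- structural — fuel > p - l always suffices (proved below), so it never runs out when called.
def pvQuickselect : Nat → List Int → Nat → Nat → Nat → List Int × Int
  | 0, A, _, _, _ => (A, 0)
  | fuel+1, A, l, p, k =>
    if l = p then (A, A.getD l 0)
    else
      let s := pvPartition A l p
      if s.2 = k then (s.1, s.1.getD k 0)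
      else if s.2 < k then pvQuickselect fuel s.1 (s.2+1) p k
      else pvQuickselect fuel s.1 l (s.2-1) k

-- the 'while l < r' binary-search loop; fuel n+1 suffices since r - l shrinks each iteration.
def pvLoop : Nat → Nat → List Int → Nat → Nat → List Int × Nat
  | 0, _, T, l, _ => (T, l)
  | fuel+1, n, T, l, r =>
    if l < r then
      let k := (l + r) / 2
      let s := pvQuickselect n T 0 (n-1) k
      if s.2 - (k:Int) ≤ 0 then pvLoop fuel n s.1 l k else pvLoop fuel n s.1 (k+1) r
    else (T, l)

def ice_cream (T : List Int) : Int :=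
  let n := T.length
  let s := pvLoop (n+1) n T 0 n
  (s.1.take s.2).sum - (PySem.List.pyRange 0 (s.2:Int) 1).sum

-- ===== PORT B =====
def ice_cream_alt (T : List Int) : Int :=
  let n := T.length
  let cnt := T.foldl
    (fun (cnt : List Int) v =>
      if 1 ≤ v then
        let j := if v < (n:Int) then v.toNat else n
        cnt.set j (cnt.getD j 0 + 1)
      else cnt)
    (List.replicate (n+1) 0)
  -- for k in range(n-1, -1, -1)  =  fold over (List.range n).reverse
  let gl := ((List.range n).reverse).foldl
    (fun (s : Int × Nat) k =>
      let g := s.1 + cnt.getD (k+1) 0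
      (g, if g ≤ (k:Int) then k else s.2))
    (0, n)
  let sm := T.foldl
    (fun (s : Int × Int) v => if (gl.2:Int) < v then (s.1 + v, s.2 + 1) else s)
    ((0:Int), (0:Int))
  sm.1 + ((gl.2:Int) - sm.2) * gl.2 - ((gl.2 * (gl.2 - 1) / 2 : Nat) : Int)

-- ===== PRECONDITION & SPEC =====
def Spec_ice_cream (T : List Int) (out : Int) : Prop := out = ice_cream_alt T
instance (T : List Int) (out : Int) : Decidable (Spec_ice_cream T out) := by unfold Spec_ice_cream; infer_instance

-- ===== CLAIM (what is proved, stated in full; the proofs are below) =====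
def Claim_equal_ice_cream : Prop := ∀ (T : List Int), Dom_ice_cream T → Spec_ice_cream T (ice_cream T)

-- ===== LEMMAS AND PROOFS =====

-- number of elements of T strictly greater than k
def cntGT (T : List Int) (k : Int) : Nat := T.countP (fun v => decide (k < v))

-- the segment of X at indices [a, b)
def seg (X : List Int) (a b : Nat) : List Int := (X.take b).drop a

-- every element at index ≥ b is ≤ every element at index < b
def SplitAt (X : List Int) (b : Nat) : Prop := ∀ u ∈ X.drop b, ∀ w ∈ X.take b, u ≤ w

-- the running 'l' of B's descending scan, as a recursion (k = 0 is processed last)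
def bestL (T : List Int) : Nat → Nat → Nat
  | 0, l0 => l0
  | m+1, l0 => bestL T m (if cntGT T (m:Int) ≤ m then m else l0)

theorem pvSwap_length (A : List Int) (i j : Nat) : (pvSwap A i j).length = A.length := by
  simp [pvSwap]

theorem pvSwap_perm (A : List Int) (i j : Nat) (hi : i < A.length) (hj : j < A.length) :
    (pvSwap A i j).Perm A := by
  rw [pvSwap, List.perm_iff_count]
  intro b
  rw [List.count_set (by simpa using hj), List.count_set hi]
  simp only [List.getD_eq_getElem _ _ hi, List.getD_eq_getElem _ _ hj, List.getElem_set]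
  have h1 : A[i] = b → 1 ≤ A.count b := fun h => List.count_pos_iff.mpr (h ▸ List.getElem_mem hi)
  have h2 : A[j] = b → 1 ≤ A.count b := fun h => List.count_pos_iff.mpr (h ▸ List.getElem_mem hj)
  by_cases hij : i = j <;> split_ifs <;> simp_all

theorem pvSwap_getD_left (A : List Int) (i j : Nat) (hi : i < A.length) (hj : j < A.length) :
    (pvSwap A i j).getD i 0 = A.getD j 0 := by
  unfold pvSwap
  rw [List.getD_eq_getElem ((A.set i (A.getD j 0)).set j (A.getD i 0)) 0 (by simpa using hi)]
  simp only [List.getElem_set]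
  split_ifs with h <;> simp_all [List.getD_eq_getElem _ _ hi, List.getD_eq_getElem _ _ hj]

theorem pvSwap_getD_right (A : List Int) (i j : Nat) (hi : i < A.length) (hj : j < A.length) :
    (pvSwap A i j).getD j 0 = A.getD i 0 := by
  simp [pvSwap, List.getD_eq_getElem?_getD, List.getElem?_set, hi, hj, List.getElem?_eq_getElem]

theorem pvSwap_getD_other (A : List Int) (i j idx : Nat) (h1 : idx ≠ i) (h2 : idx ≠ j) :
    (pvSwap A i j).getD idx 0 = A.getD idx 0 := by
  simp [pvSwap, List.getD_eq_getElem?_getD, List.getElem?_set, h1.symm, h2.symm]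

theorem mem_seg_iff (X : List Int) (a b : Nat) (v : Int) :
    v ∈ seg X a b ↔ ∃ i, a ≤ i ∧ i < b ∧ i < X.length ∧ X.getD i 0 = v := by
  simp only [seg, List.mem_iff_getElem]
  constructor
  · rintro ⟨i, hi, rfl⟩
    have hlen := hi
    simp only [List.length_drop, List.length_take] at hlen
    refine ⟨a + i, Nat.le_add_right _ _, by omega, by omega, ?_⟩
    rw [List.getElem_drop, List.getElem_take]
    rw [List.getD_eq_getElem _ _ (by omega)]
  · rintro ⟨i, hai, hib, hilen, rfl⟩
    refine ⟨i - a, by simp [List.length_drop, List.length_take]; omega, ?_⟩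
    rw [List.getElem_drop, List.getElem_take]
    rw [List.getD_eq_getElem _ _ (by omega)]
    congr 1; omega

theorem take_eq_of_getD (X Y : List Int) (hlen : X.length = Y.length) (t : Nat)
    (h : ∀ idx, idx < t → X.getD idx 0 = Y.getD idx 0) : X.take t = Y.take t := by
  apply List.ext_getElem
  · simp [hlen]
  · intro i h1 h2
    simp only [List.getElem_take]
    have hx : i < X.length := by simp at h1; omega
    rw [← List.getD_eq_getElem X 0 hx, ← List.getD_eq_getElem Y 0 (by omega)]
    exact h i (by simp at h1; omega)

theorem drop_eq_of_getD (X Y : List Int) (hlen : X.length = Y.length) (d : Nat)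
    (h : ∀ idx, d ≤ idx → X.getD idx 0 = Y.getD idx 0) : X.drop d = Y.drop d := by
  apply List.ext_getElem
  · simp [hlen]
  · intro i h1 h2
    simp only [List.getElem_drop]
    have hx : d + i < X.length := by simp at h1; omega
    rw [← List.getD_eq_getElem X 0 hx, ← List.getD_eq_getElem Y 0 (by omega)]
    exact h _ (by omega)

theorem seg_decomp (X : List Int) (a b : Nat) (hab : a ≤ b) (hb : b ≤ X.length) :
    X = X.take a ++ seg X a b ++ X.drop b := by
  have h1 : X.take a = (X.take b).take a := by rw [List.take_take, Nat.min_eq_left hab]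
  rw [seg, h1, List.append_assoc]
  conv_rhs => rw [← List.append_assoc, List.take_append_drop, List.take_append_drop]

theorem seg_perm (X Y : List Int) (hp : X.Perm Y) (a b : Nat)
    (h1 : X.take a = Y.take a) (h2 : X.drop b = Y.drop b) (hab : a ≤ b)
    (hb : b ≤ X.length) (hb' : b ≤ Y.length) : (seg X a b).Perm (seg Y a b) := by
  have hx := seg_decomp X a b hab hb
  have hy := seg_decomp Y a b hab hb'
  rw [hx, hy, h1, h2] at hp
  rw [List.append_assoc, List.append_assoc] at hp
  have := (List.perm_append_left_iff _).mp hp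
  exact (List.perm_append_right_iff _).mp this

theorem countP_succ_le_of_mem_not (l : List Int) (p : Int → Bool) (x : Int)
    (hx : x ∈ l) (hpx : ¬ p x) : l.countP p + 1 ≤ l.length := by
  induction l with
  | nil => cases hx
  | cons a t ih =>
    rw [List.countP_cons, List.length_cons]
    rcases List.mem_cons.mp hx with rfl | hxt
    · simp [hpx]
      have := List.countP_le_length (p := p) (l := t)
      omega
    · have := ih hxt
      split_ifs <;> omega

theorem seg_zero (X : List Int) (b : Nat) : seg X 0 b = X.take b := by simp [seg]

theorem seg_to_len (X : List Int) (a : Nat) : seg X a X.length = X.drop a := by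
  simp [seg, List.take_length]

theorem part_loop_spec (A : List Int) (x : Int) (l : Nat) :
    ∀ t, l + t ≤ A.length → ∀ B i,
    (List.range' l t).foldl
        (fun (s : List Int × Nat) j => if x < s.1.getD j 0 then (pvSwap s.1 s.2 j, s.2 + 1) else s)
        (A, l) = (B, i) →
    B.length = A.length ∧ B.Perm A ∧ l ≤ i ∧ i ≤ l + t ∧
    (∀ idx, (idx < l ∨ l + t ≤ idx) → B.getD idx 0 = A.getD idx 0) ∧
    (∀ idx, l ≤ idx → idx < i → x < B.getD idx 0) ∧
    (∀ idx, i ≤ idx → idx < l + t → B.getD idx 0 ≤ x) := by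
  intro t
  induction t with
  | zero =>
    intro _ B i h
    simp only [List.range'_zero, List.foldl_nil, Prod.mk.injEq] at h
    obtain ⟨rfl, rfl⟩ := h
    refine ⟨rfl, List.Perm.refl _, le_refl _, by omega, fun _ _ => rfl, by omega, by omega⟩
  | succ t ih =>
    intro hlen B i h
    rw [List.range'_concat, List.foldl_append] at h
    simp only [Nat.one_mul] at h
    obtain ⟨B0, i0, h0⟩ : ∃ B0 i0, (List.range' l t).foldl
        (fun (s : List Int × Nat) j => if x < s.1.getD j 0 then (pvSwap s.1 s.2 j, s.2 + 1) else s)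
        (A, l) = (B0, i0) := ⟨_, _, rfl⟩
    obtain ⟨hB0len, hB0perm, hli0, hi0t, hout0, hgt0, hle0⟩ := ih (by omega) B0 i0 h0
    rw [h0] at h
    simp only [List.foldl_cons, List.foldl_nil] at h
    by_cases hc : x < B0.getD (l + t) 0
    · rw [if_pos hc] at h
      rw [Prod.mk.injEq] at h
      obtain ⟨rfl, rfl⟩ := h
      have hi0lt : i0 < A.length := by omega
      have hltlen : l + t < A.length := by omega
      have hi0lt' : i0 < B0.length := by omega
      have hltlen' : l + t < B0.length := by omega
      refine ⟨by rw [pvSwap_length]; omega, (pvSwap_perm _ _ _ hi0lt' hltlen').trans hB0perm,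
        by omega, by omega, ?_, ?_, ?_⟩
      · intro idx hidx
        rw [pvSwap_getD_other _ _ _ _ (by omega) (by omega)]
        exact hout0 idx (by omega)
      · intro idx h1 h2
        by_cases hii : idx = i0
        · subst hii; rw [pvSwap_getD_left _ _ _ hi0lt' hltlen']; exact hc
        · by_cases hjj : idx = l + t
          · subst hjj
            -- idx = l+t < i0+1 so i0 ≥ l+t, but i0 ≤ l+t hence i0 = l+t, contradiction with hii
            omega
          · rw [pvSwap_getD_other _ _ _ _ hii hjj]; exact hgt0 idx h1 (by omega)
      · intro idx h1 h2
        by_cases hjj : idx = l + t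
        · subst hjj
          rw [pvSwap_getD_right _ _ _ hi0lt' hltlen']
          exact hle0 i0 (le_refl _) (by omega)
        · rw [pvSwap_getD_other _ _ _ _ (by omega) hjj]
          exact hle0 idx (by omega) (by omega)
    · rw [if_neg hc] at h
      rw [Prod.mk.injEq] at h
      obtain ⟨rfl, rfl⟩ := h
      refine ⟨hB0len, hB0perm, by omega, by omega, ?_, hgt0, ?_⟩
      · intro idx hidx
        rcases hidx with hidx | hidx
        · exact hout0 idx (Or.inl hidx)
        · exact hout0 idx (Or.inr (by omega))
      · intro idx h1 h2
        by_cases hjj : idx = l + t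
        · subst hjj; exact not_lt.mp hc
        · exact hle0 idx h1 (by omega)

theorem partition_spec (A : List Int) (l p : Nat) (hlp : l ≤ p) (hp : p < A.length) :
    (pvPartition A l p).1.length = A.length ∧
    (pvPartition A l p).1.Perm A ∧
    l ≤ (pvPartition A l p).2 ∧ (pvPartition A l p).2 ≤ p ∧
    (∀ idx, (idx < l ∨ p < idx) → (pvPartition A l p).1.getD idx 0 = A.getD idx 0) ∧
    (∀ idx, l ≤ idx → idx < (pvPartition A l p).2 →
        A.getD p 0 < (pvPartition A l p).1.getD idx 0) ∧
    (pvPartition A l p).1.getD (pvPartition A l p).2 0 = A.getD p 0 ∧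
    (∀ idx, (pvPartition A l p).2 < idx → idx ≤ p →
        (pvPartition A l p).1.getD idx 0 ≤ A.getD p 0) := by
  obtain ⟨B, i, h0⟩ : ∃ B i, (List.range' l (p - l)).foldl
      (fun (s : List Int × Nat) j =>
        if A.getD p 0 < s.1.getD j 0 then (pvSwap s.1 s.2 j, s.2 + 1) else s)
      (A, l) = (B, i) := ⟨_, _, rfl⟩
  obtain ⟨hlen, hperm, hli, hit, hout, hgt, hle⟩ :=
    part_loop_spec A (A.getD p 0) l (p - l) (by omega) B i h0
  have hlt : l + (p - l) = p := by omega
  rw [hlt] at hit hout hle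
  have hBp : B.getD p 0 = A.getD p 0 := hout p (Or.inr (le_refl _))
  have hiB : i < B.length := by omega
  have hpB : p < B.length := by omega
  have key : pvPartition A l p = (pvSwap B i p, i) := by
    rw [pvPartition]; simp only [h0]
  rw [key]
  refine ⟨by rw [pvSwap_length]; omega, (pvSwap_perm _ _ _ hiB hpB).trans hperm,
    hli, by omega, ?_, ?_, ?_, ?_⟩
  · intro idx hidx
    rw [pvSwap_getD_other _ _ _ _ (by omega) (by omega)]
    exact hout idx (by omega)
  · intro idx h1 h2
    rw [pvSwap_getD_other _ _ _ _ (by omega) (by omega)]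
    exact hgt idx h1 h2
  · rw [pvSwap_getD_left _ _ _ hiB hpB]; exact hBp
  · intro idx h1 h2
    by_cases hij : idx = p
    · subst hij
      rw [pvSwap_getD_right _ _ _ hiB hpB]
      exact hle i (le_refl _) (by omega)
    · rw [pvSwap_getD_other _ _ _ _ (by omega) hij]
      exact hle idx (by omega) (by omega)

theorem quickselect_spec : ∀ (fuel : Nat) (A : List Int) (l p k : Nat),
    l ≤ k → k ≤ p → p < A.length → p - l < fuel →
    (pvQuickselect fuel A l p k).1.length = A.length ∧
    (pvQuickselect fuel A l p k).1.Perm A ∧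
    (∀ idx, (idx < l ∨ p < idx) → (pvQuickselect fuel A l p k).1.getD idx 0 = A.getD idx 0) ∧
    (pvQuickselect fuel A l p k).2 = (pvQuickselect fuel A l p k).1.getD k 0 ∧
    (∀ a ∈ seg (pvQuickselect fuel A l p k).1 l (k+1),
     ∀ b ∈ seg (pvQuickselect fuel A l p k).1 k (p+1), b ≤ a) := by
  intro fuel
  induction fuel with
  | zero => intro A l p k _ _ _ h; omega
  | succ f ih =>
    intro A l p k hlk hkp hp hfuel
    by_cases hlp : l = p
    · subst hlp
      have hkl : k = l := by omega
      subst hkl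
      simp only [pvQuickselect, if_pos rfl]
      refine ⟨rfl, List.Perm.refl _, fun _ _ => rfl, rfl, ?_⟩
      intro a ha b hb
      rw [mem_seg_iff] at ha hb
      obtain ⟨ia, h1, h2, h3, rfl⟩ := ha
      obtain ⟨ib, g1, g2, g3, rfl⟩ := hb
      have h4 : ia = k := by omega
      have g4 : ib = k := by omega
      rw [h4, g4]
    · have hlp' : l ≤ p := by omega
      obtain ⟨hBlen, hBperm, hlq, hqp, hout, hgt, heq, hle⟩ := partition_spec A l p hlp' hp
      have hqs : pvQuickselect (f+1) A l p k =
          (if (pvPartition A l p).2 = k then ((pvPartition A l p).1, (pvPartition A l p).1.getD k 0)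
           else if (pvPartition A l p).2 < k then pvQuickselect f (pvPartition A l p).1 ((pvPartition A l p).2+1) p k
           else pvQuickselect f (pvPartition A l p).1 l ((pvPartition A l p).2-1) k) := by
        conv_lhs => rw [pvQuickselect]
        rw [if_neg hlp]
      set B := (pvPartition A l p).1 with hBdef
      set q := (pvPartition A l p).2 with hqdef
      by_cases hqk : q = k
      · rw [hqs, if_pos hqk]
        subst hqk
        refine ⟨hBlen, hBperm, fun idx hidx => hout idx hidx, rfl, ?_⟩
        intro a ha b hb
        rw [mem_seg_iff] at ha hb
        obtain ⟨ia, h1, h2, h3, rfl⟩ := ha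
        obtain ⟨ib, g1, g2, g3, rfl⟩ := hb
        have hax : A.getD p 0 ≤ B.getD ia 0 := by
          rcases Nat.lt_or_ge ia q with h | h
          · exact le_of_lt (hgt ia h1 h)
          · have : ia = q := by omega
            rw [this, heq]
        have hbx : B.getD ib 0 ≤ A.getD p 0 := by
          rcases Nat.lt_or_ge q ib with h | h
          · exact hle ib h (by omega)
          · have : ib = q := by omega
            rw [this, heq]
        exact le_trans hbx hax
      · by_cases hqlt : q < k
        · rw [hqs, if_neg hqk, if_pos hqlt]
          obtain ⟨ih1, ih2, ih3, ih4, ih5⟩ := ih B (q+1) p k (by omega) hkp (by omega) (by omega)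
          set C := (pvQuickselect f B (q+1) p k).1 with hCdef
          have hCtake : C.take (q+1) = B.take (q+1) :=
            take_eq_of_getD _ _ ih1 _ (fun idx hidx => ih3 idx (Or.inl hidx))
          have hCdrop : C.drop (p+1) = B.drop (p+1) :=
            drop_eq_of_getD _ _ ih1 _ (fun idx hidx => ih3 idx (Or.inr (by omega)))
          have hsegperm : (seg C (q+1) (p+1)).Perm (seg B (q+1) (p+1)) :=
            seg_perm _ _ ih2 _ _ hCtake hCdrop (by omega) (by omega) (by omega)
          refine ⟨by omega, ih2.trans hBperm, ?_, ih4, ?_⟩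
          · intro idx hidx
            rw [ih3 idx (by omega)]
            exact hout idx hidx
          · intro a ha b hb
            -- b is in seg C k (p+1) ⊆ seg C (q+1) (p+1) ~ seg B (q+1) (p+1), so b ≤ pivot
            have hbx : b ≤ A.getD p 0 := by
              rw [mem_seg_iff] at hb
              obtain ⟨ib, g1, g2, g3, rfl⟩ := hb
              have hbmem : C.getD ib 0 ∈ seg C (q+1) (p+1) := by
                rw [mem_seg_iff]; exact ⟨ib, by omega, g2, g3, rfl⟩
              have := hsegperm.mem_iff.mp hbmem
              rw [mem_seg_iff] at this
              obtain ⟨ib', g1', g2', g3', hval⟩ := this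
              rw [← hval]
              exact hle ib' (by omega) (by omega)
            rw [mem_seg_iff] at ha
            obtain ⟨ia, h1, h2, h3, rfl⟩ := ha
            rcases Nat.lt_or_ge ia (q+1) with hcase | hcase
            · -- index in the untouched left part: value ≥ pivot
              have hCa : C.getD ia 0 = B.getD ia 0 := ih3 ia (Or.inl hcase)
              have hax : A.getD p 0 ≤ C.getD ia 0 := by
                rw [hCa]
                rcases Nat.lt_or_ge ia q with hh | hh
                · exact le_of_lt (hgt ia h1 hh)
                · have : ia = q := by omega
                  rw [this, heq]
              exact le_trans hbx hax
            · -- index in the recursed range: use the IH's split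
              have hamem : C.getD ia 0 ∈ seg C (q+1) (k+1) := by
                rw [mem_seg_iff]; exact ⟨ia, hcase, h2, h3, rfl⟩
              exact ih5 _ hamem b hb
        · have hklt : k < q := by omega
          rw [hqs, if_neg hqk, if_neg hqlt]
          obtain ⟨ih1, ih2, ih3, ih4, ih5⟩ := ih B l (q-1) k (by omega) (by omega) (by omega) (by omega)
          set C := (pvQuickselect f B l (q-1) k).1 with hCdef
          have hCtake : C.take l = B.take l :=
            take_eq_of_getD _ _ ih1 _ (fun idx hidx => ih3 idx (Or.inl hidx))
          have hCdrop : C.drop q = B.drop q :=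
            drop_eq_of_getD _ _ ih1 _ (fun idx hidx => ih3 idx (Or.inr (by omega)))
          have hsegperm : (seg C l q).Perm (seg B l q) :=
            seg_perm _ _ ih2 _ _ hCtake hCdrop (by omega) (by omega) (by omega)
          refine ⟨by omega, ih2.trans hBperm, ?_, ih4, ?_⟩
          · intro idx hidx
            rw [ih3 idx (by omega)]
            exact hout idx hidx
          · intro a ha b hb
            -- a sits in seg C l q ~ seg B l q whose values are all > pivot
            have hax : A.getD p 0 ≤ a := by
              rw [mem_seg_iff] at ha
              obtain ⟨ia, h1, h2, h3, rfl⟩ := ha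
              have hamem : C.getD ia 0 ∈ seg C l q := by
                rw [mem_seg_iff]; exact ⟨ia, h1, by omega, h3, rfl⟩
              have := hsegperm.mem_iff.mp hamem
              rw [mem_seg_iff] at this
              obtain ⟨ia', g1', g2', g3', hval⟩ := this
              rw [← hval]
              exact le_of_lt (hgt ia' g1' g2')
            rw [mem_seg_iff] at hb
            obtain ⟨ib, g1, g2, g3, rfl⟩ := hb
            rcases Nat.lt_or_ge ib q with hcase | hcase
            · -- inside the recursed range: IH's split
              have hbmem : C.getD ib 0 ∈ seg C k (q-1+1) := by
                rw [mem_seg_iff]; exact ⟨ib, g1, by omega, g3, rfl⟩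
              exact ih5 a ha _ hbmem
            · -- at or right of the pivot: value ≤ pivot ≤ a
              have hCb : C.getD ib 0 = B.getD ib 0 := ih3 ib (Or.inr (by omega))
              have hbx : C.getD ib 0 ≤ A.getD p 0 := by
                rw [hCb]
                rcases Nat.lt_or_ge q ib with hh | hh
                · exact hle ib hh (by omega)
                · have : ib = q := by omega
                  rw [this, heq]
              exact le_trans hbx hax

theorem cond_iff (T : List Int) (k : Nat) (hk : k < T.length) (fuel : Nat)
    (hfuel : T.length - 1 < fuel) :
    ((pvQuickselect fuel T 0 (T.length - 1) k).2 ≤ (k:Int) ↔ cntGT T k ≤ k) := by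
  obtain ⟨h1, h2, h3, h4, h5⟩ :=
    quickselect_spec fuel T 0 (T.length - 1) k (by omega) (by omega) (by omega) hfuel
  set X := (pvQuickselect fuel T 0 (T.length - 1) k).1 with hX
  set x := (pvQuickselect fuel T 0 (T.length - 1) k).2 with hx
  have hlen : X.length = T.length := h1
  have hsub : T.length - 1 + 1 = T.length := by omega
  rw [hsub] at h5
  have hdom : ∀ a ∈ X.take (k+1), ∀ b ∈ X.drop k, b ≤ a := by
    intro a ha b hb
    refine h5 a ?_ b ?_
    · rw [seg_zero]; exact ha
    · rw [← hlen, seg_to_len]; exact hb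
  have hxmem_take : x ∈ X.take (k+1) := by
    have : x ∈ seg X 0 (k+1) := by
      rw [mem_seg_iff]; exact ⟨k, by omega, by omega, by omega, h4.symm⟩
    rwa [seg_zero] at this
  have hxmem_drop : x ∈ X.drop k := by
    have : x ∈ seg X k X.length := by
      rw [mem_seg_iff]; exact ⟨k, le_refl _, by omega, by omega, h4.symm⟩
    rwa [seg_to_len] at this
  have hcnt : T.countP (fun v => decide ((k:Int) < v)) = X.countP (fun v => decide ((k:Int) < v)) :=
    (h2.countP_eq _).symm
  have hXsplit : X = X.take (k+1) ++ X.drop (k+1) := (List.take_append_drop _ _).symm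
  constructor
  · intro hxk
    -- every element of drop (k+1) ≤ x ≤ k, so contributes 0; take (k+1) contributes ≤ k since x fails
    have hdropz : (X.drop (k+1)).countP (fun v => decide ((k:Int) < v)) = 0 := by
      rw [List.countP_eq_zero]
      intro b hb
      have hb' : b ∈ X.drop k := by
        have : X.drop (k+1) = (X.drop k).drop 1 := by rw [List.drop_drop]
        exact List.mem_of_mem_drop (this ▸ hb)
      have := hdom x hxmem_take b hb'
      simp; omega
    have htake : (X.take (k+1)).countP (fun v => decide ((k:Int) < v)) ≤ k := by
      have hlt : (X.take (k+1)).length = k + 1 := by rw [List.length_take]; omega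
      have := countP_succ_le_of_mem_not (X.take (k+1)) (fun v => decide ((k:Int) < v)) x
        hxmem_take (by simp; omega)
      omega
    rw [cntGT, hcnt]
    conv_lhs => rw [hXsplit]
    rw [List.countP_append]
    omega
  
  · intro hcntk
    by_contra hxk
    have hxgt : (k:Int) < x := by omega
    have hallgt : ∀ a ∈ X.take (k+1), (k:Int) < a := fun a ha =>
      lt_of_lt_of_le hxgt (hdom a ha x hxmem_drop)
    have htake : (X.take (k+1)).countP (fun v => decide ((k:Int) < v)) = k+1 := by
      have hlt : (X.take (k+1)).length = k + 1 := by rw [List.length_take]; omega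
      rw [List.countP_eq_length.mpr (fun a ha => by simpa using hallgt a ha), hlt]
    have : cntGT T k ≥ k+1 := by
      rw [cntGT, hcnt]
      conv_lhs => rw [hXsplit]
      rw [List.countP_append]
      have hlt : (X.take (k+1)).length = k + 1 := by rw [List.length_take]; omega
      omega
    omega

theorem split_after_qs (T : List Int) (k : Nat) (hk : k < T.length) (fuel : Nat)
    (hfuel : T.length - 1 < fuel) :
    SplitAt (pvQuickselect fuel T 0 (T.length - 1) k).1 k ∧
    SplitAt (pvQuickselect fuel T 0 (T.length - 1) k).1 (k+1) := by
  obtain ⟨h1, h2, h3, h4, h5⟩ :=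
    quickselect_spec fuel T 0 (T.length - 1) k (by omega) (by omega) (by omega) hfuel
  set X := (pvQuickselect fuel T 0 (T.length - 1) k).1 with hX
  have hlen : X.length = T.length := h1
  have hsub : T.length - 1 + 1 = T.length := by omega
  rw [hsub] at h5
  have hdom : ∀ a ∈ X.take (k+1), ∀ b ∈ X.drop k, b ≤ a := by
    intro a ha b hb
    refine h5 a ?_ b ?_
    · rw [seg_zero]; exact ha
    · rw [← hlen, seg_to_len]; exact hb
  constructor
  · intro u hu w hw
    have hw' : w ∈ X.take (k+1) := by
      have : X.take k = (X.take (k+1)).take k := by rw [List.take_take]; congr 1; omega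
      exact List.mem_of_mem_take (this ▸ hw)
    exact hdom w hw' u hu
  · intro u hu w hw
    have hu' : u ∈ X.drop k := by
      have : X.drop (k+1) = (X.drop k).drop 1 := by rw [List.drop_drop]
      exact List.mem_of_mem_drop (this ▸ hu)
    exact hdom w hw u hu'

theorem cntGT_anti (T : List Int) (k k' : Int) (h : k ≤ k') : cntGT T k' ≤ cntGT T k := by
  apply List.countP_mono_left; intro a _ ha; simp at ha ⊢; omega

theorem loop_spec (T0 : List Int) :
    ∀ (fuel : Nat), ∀ (l r : Nat) (T : List Int), r ≤ T0.length → l ≤ r → T.Perm T0 →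
    T.length = T0.length → r - l < fuel →
    (∀ k, k < l → ¬ (cntGT T0 (k:Int) ≤ k)) → (cntGT T0 (r:Int) ≤ r) →
    (l = r → SplitAt T l) →
    (pvLoop fuel T0.length T l r).1.Perm T0 ∧
    (pvLoop fuel T0.length T l r).1.length = T0.length ∧
    SplitAt (pvLoop fuel T0.length T l r).1 (pvLoop fuel T0.length T l r).2 ∧
    (∀ k, k < (pvLoop fuel T0.length T l r).2 → ¬ (cntGT T0 (k:Int) ≤ k)) ∧
    (cntGT T0 ((pvLoop fuel T0.length T l r).2 : Int) ≤ (pvLoop fuel T0.length T l r).2) ∧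
    (pvLoop fuel T0.length T l r).2 ≤ T0.length := by
  intro fuel
  induction fuel with
  | zero => intro l r T _ _ _ _ h; omega
  | succ f ih =>
    intro l r T hr hlr hperm hlen hfuel hbelow hCr hsplit
    by_cases hlt : l < r
    · have hn1 : 1 ≤ T0.length := by omega
      set k := (l + r) / 2 with hk
      have hkl : l ≤ k := by omega
      have hkr : k < r := by omega
      have hkn : k < T.length := by omega
      obtain ⟨hqlen, hqperm, -, -, -⟩ := quickselect_spec T0.length T 0 (T0.length - 1) k
        (by omega) (by omega) (by omega) (by omega)
      have hcond := cond_iff T k hkn T0.length (by omega)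
      have hsp := split_after_qs T k hkn T0.length (by omega)
      rw [hlen] at hcond hsp
      have hcntT : cntGT T (k:Int) = cntGT T0 (k:Int) := hperm.countP_eq _
      have hunfold : pvLoop (f+1) T0.length T l r =
          (if (pvQuickselect T0.length T 0 (T0.length-1) k).2 - (k:Int) ≤ 0
           then pvLoop f T0.length (pvQuickselect T0.length T 0 (T0.length-1) k).1 l k
           else pvLoop f T0.length (pvQuickselect T0.length T 0 (T0.length-1) k).1 (k+1) r) := by
        rw [pvLoop]
        rw [if_pos hlt]
      set X := (pvQuickselect T0.length T 0 (T0.length-1) k).1 with hXd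
      set x := (pvQuickselect T0.length T 0 (T0.length-1) k).2 with hxd
      have hXperm : X.Perm T0 := hqperm.trans hperm
      have hXlen : X.length = T0.length := by omega
      by_cases hc : x - (k:Int) ≤ 0
      · rw [hunfold, if_pos hc]
        have hCk : cntGT T0 (k:Int) ≤ k := by
          rw [← hcntT]; exact hcond.mp (by omega)
        exact ih l k X (by omega) hkl hXperm hXlen (by omega) hbelow hCk
          (fun hlk => hlk ▸ hsp.1)
      · rw [hunfold, if_neg hc]
        have hnCk : ¬ (cntGT T0 (k:Int) ≤ k) := by
          rw [← hcntT]
          intro hcc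
          exact hc (by have := hcond.mpr hcc; omega)
        refine ih (k+1) r X hr (by omega) hXperm hXlen (by omega) ?_ hCr
          (fun hlk => hlk ▸ hsp.2)
        intro k' hk'
        rcases Nat.lt_or_ge k' k with h | h
        · intro hCk'
          apply hnCk
          have := cntGT_anti T0 (k':Int) (k:Int) (by exact_mod_cast Nat.le_of_lt h)
          omega
        · have : k' = k := by omega
          subst this
          exact hnCk
    · have hlr' : l = r := by omega
      rw [pvLoop, if_neg hlt]
      exact ⟨hperm, hlen, hsplit hlr', hbelow, by rw [hlr']; exact hCr, by omega⟩

theorem sum_filter_split (l : List Int) (p : Int → Bool) :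
    l.sum = (l.filter p).sum + (l.filter (fun v => !p v)).sum := by
  induction l with
  | nil => simp
  | cons a t ih =>
    by_cases h : p a <;> simp [List.filter_cons, h, ih] <;> ring

theorem sum_const (l : List Int) (m : Int) (h : ∀ x ∈ l, x = m) : l.sum = l.length * m := by
  have he := List.eq_replicate_of_mem h
  conv_lhs => rw [he, List.sum_replicate]
  rw [nsmul_eq_mul]

theorem sum_take_eq (T0 X : List Int) (L : Nat) (hperm : X.Perm T0) (hlen : X.length = T0.length)
    (hsplit : SplitAt X L) (hL : L ≤ T0.length) (hC : cntGT T0 (L:Int) ≤ L)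
    (hNC : ∀ k, k < L → ¬ (cntGT T0 (k:Int) ≤ k)) :
    (X.take L).sum = (T0.filter (fun v => decide ((L:Int) < v))).sum
      + ((L:Int) - (cntGT T0 (L:Int) : Int)) * L := by
  set p : Int → Bool := fun v => decide ((L:Int) < v) with hp
  have hlenP : (X.take L).length = L := by rw [List.length_take]; omega
  have hcntX : cntGT T0 (L:Int) = X.countP p := (hperm.countP_eq _).symm
  have hXsplit : X = X.take L ++ X.drop L := (List.take_append_drop _ _).symm
  -- (b) every element of the suffix is ≤ L
  have hb : ∀ u ∈ X.drop L, u ≤ (L:Int) := by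
    intro u hu
    by_contra hgt
    have hPall : ∀ w ∈ X.take L, p w = true := by
      intro w hw
      have := hsplit u hu w hw
      simp only [hp, decide_eq_true_eq]
      omega
    have h1 : (X.take L).countP p = L := by
      rw [List.countP_eq_length.mpr hPall, hlenP]
    have h2 : 0 < (X.drop L).countP p := by
      rw [List.countP_pos_iff]
      exact ⟨u, hu, by simp [hp]; omega⟩
    have h3 : X.countP p = (X.take L).countP p + (X.drop L).countP p := by
      conv_lhs => rw [hXsplit]
      rw [List.countP_append]
    omega
  -- (a) every element of the prefix is ≥ L
  have ha : ∀ w ∈ X.take L, (L:Int) ≤ w := by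
    intro w hw
    by_contra hlt
    have hL1 : 1 ≤ L := by
      by_contra h0
      have : L = 0 := by omega
      rw [this] at hw; simp at hw
    have hNCL := hNC (L-1) (by omega)
    set q : Int → Bool := fun v => decide (((L-1:Nat):Int) < v) with hq
    have hcast : ((L-1:Nat):Int) = (L:Int) - 1 := by push_cast; omega
    have hqz : (X.drop L).countP q = 0 := by
      rw [List.countP_eq_zero]
      intro u hu
      have h1 := hsplit u hu w hw
      simp only [hq, decide_eq_true_eq, not_lt, hcast]
      omega
    have hqtake : (X.take L).countP q + 1 ≤ L := by
      have := countP_succ_le_of_mem_not (X.take L) q w hw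
        (by simp only [hq, decide_eq_true_eq, hcast]; omega)
      omega
    have h3 : X.countP q = (X.take L).countP q + (X.drop L).countP q := by
      conv_lhs => rw [hXsplit]
      rw [List.countP_append]
    have hcq : cntGT T0 ((L-1:Nat):Int) = X.countP q := (hperm.countP_eq _).symm
    rw [cntGT] at hNCL hcq
    omega
  -- sums
  have hfperm : (T0.filter p).sum = (X.filter p).sum := ((hperm.filter p).sum_eq).symm
  have hfsplit : (X.filter p).sum = ((X.take L).filter p).sum + ((X.drop L).filter p).sum := by
    conv_lhs => rw [hXsplit]
    rw [List.filter_append, List.sum_append]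
  have hdropnil : (X.drop L).filter p = [] := by
    rw [List.filter_eq_nil_iff]
    intro u hu
    have := hb u hu
    simp [hp]; omega
  have hsumsplit : (X.take L).sum
      = ((X.take L).filter p).sum + ((X.take L).filter (fun v => !p v)).sum :=
    sum_filter_split _ _
  have hconst : ((X.take L).filter (fun v => !p v)).sum
      = (((X.take L).filter (fun v => !p v)).length : Int) * L := by
    apply sum_const
    intro v hv
    have h1 := List.of_mem_filter hv
    have h2 := ha v (List.mem_of_mem_filter hv)
    simp only [hp, Bool.not_eq_true', decide_eq_false_iff_not, not_lt] at h1
    omega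
  have hlencnt : ((X.take L).filter (fun v => !p v)).length
      = L - (X.take L).countP p := by
    rw [← List.countP_eq_length_filter]
    have hnp : (fun a => decide (¬ p a = true)) = (fun v => !p v) := by
      funext a; by_cases h : p a <;> simp [h]
    have h5 := List.length_eq_countP_add_countP (p := p) (l := X.take L)
    rw [hnp, hlenP] at h5
    omega
  have hcnttake : (X.take L).countP p = cntGT T0 (L:Int) := by
    have h3 : X.countP p = (X.take L).countP p + (X.drop L).countP p := by
      conv_lhs => rw [hXsplit]
      rw [List.countP_append]
    have h4 : (X.drop L).countP p = 0 := by
      rw [List.countP_eq_zero]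
      intro u hu
      have := hb u hu
      simp [hp]; omega
    omega
  rw [hsumsplit, hconst, hlencnt, hcnttake, hfperm, hfsplit, hdropnil]
  simp only [List.sum_nil, add_zero]
  have hcle : cntGT T0 (L:Int) ≤ L := hC
  push_cast [Nat.cast_sub hcle]
  ring

theorem gauss2 : ∀ n : Nat, 2 * (List.range n).sum = n * (n-1) := by
  intro n
  induction n with
  | zero => rfl
  | succ m ih =>
    rw [List.range_succ, List.sum_append, Nat.mul_add, ih]
    simp only [List.sum_cons, List.sum_nil, Nat.add_zero, Nat.add_sub_cancel]
    cases m with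
    | zero => rfl
    | succ mm =>
      have h1 : 1 + mm - 1 = mm := by omega
      ring_nf
      rw [h1]
      ring

theorem pyRange_sum (L : Nat) :
    (PySem.List.pyRange 0 (L:Int) 1).sum = ((L * (L - 1) / 2 : Nat) : Int) := by
  rw [PySem.List.pyRange_one]
  have h1 : ((L:Int) - 0).toNat = L := by omega
  rw [h1]
  have h2 : ∀ m : Nat, ((List.range m).map (fun k : Nat => (0:Int) + (k:Nat))).sum
      = (((List.range m).sum : Nat) : Int) := by
    intro m
    induction m with
    | zero => rfl
    | succ mm ih => rw [List.range_succ, List.map_append, List.sum_append, ih]; push_cast; simp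
  rw [h2]
  have h3 := gauss2 L
  congr 1
  generalize hP : L * (L-1) = P at *
  omega

theorem set_getD_same (l : List Int) (i : Nat) (a : Int) (h : i < l.length) :
    (l.set i a).getD i 0 = a := by
  rw [List.getD_eq_getElem _ _ (by simpa using h)]
  simp [List.getElem_set]

theorem set_getD_other (l : List Int) (i j : Nat) (a : Int) (h : j ≠ i) :
    (l.set i a).getD j 0 = l.getD j 0 := by
  rw [List.getD_eq_getElem?_getD, List.getD_eq_getElem?_getD, List.getElem?_set,
    if_neg (Ne.symm h)]

-- the counting pass, generalized over the accumulator

theorem cnt_build (n : Nat) : ∀ (U : List Int) (cnt : List Int), cnt.length = n+1 →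
    ∀ j, j ≤ n →
    (U.foldl (fun (cnt : List Int) v =>
        if 1 ≤ v then
          let jj := if v < (n:Int) then v.toNat else n
          cnt.set jj (cnt.getD jj 0 + 1)
        else cnt) cnt).getD j 0
      = cnt.getD j 0
        + (U.countP (fun v => decide (1 ≤ v ∧ (if v < (n:Int) then v.toNat else n) = j)) : Int) := by
  intro U
  induction U with
  | nil => intro cnt _ j _; simp
  | cons v U ih =>
    intro cnt hlen j hj
    rw [List.foldl_cons, List.countP_cons]
    by_cases hv : 1 ≤ v
    · simp only [if_pos hv]
      set jj := if v < (n:Int) then v.toNat else n with hjj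
      have hjjn : jj ≤ n := by
        rw [hjj]; split_ifs with hvn
        · have : v.toNat < n := by omega
          omega
        · exact le_refl _
      have hlen' : (cnt.set jj (cnt.getD jj 0 + 1)).length = n+1 := by simpa using hlen
      rw [ih _ hlen' j hj]
      by_cases hje : j = jj
      · subst hje
        rw [set_getD_same _ _ _ (by omega)]
        have : (decide (1 ≤ v ∧ (if v < (n:Int) then v.toNat else n) = jj)) = true := by
          rw [← hjj]; simp [hv]
        rw [this]
        norm_num
        push_cast
        ring
      · rw [set_getD_other _ _ _ _ hje]
        have : (decide (1 ≤ v ∧ (if v < (n:Int) then v.toNat else n) = j)) = false := by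
          rw [← hjj]
          simp only [decide_eq_false_iff_not]
          rintro ⟨_, hh⟩
          exact hje hh.symm
        rw [this]
        norm_num
    · simp only [if_neg hv]
      rw [ih _ hlen j hj]
      have : (decide (1 ≤ v ∧ (if v < (n:Int) then v.toNat else n) = j)) = false := by
        simp; intro h; omega
      rw [this]
      norm_num

-- countP split along p = q ∨ r (disjoint)

theorem countP_split (l : List Int) (p q r : Int → Bool)
    (h : ∀ v, p v = (q v || r v)) (hd : ∀ v, ¬(q v ∧ r v)) :
    l.countP p = l.countP q + l.countP r := by
  induction l with
  | nil => simp
  | cons a t ih =>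
    rw [List.countP_cons, List.countP_cons, List.countP_cons, ih]
    have := h a
    have := hd a
    by_cases hq : q a <;> by_cases hr : r a <;> simp_all <;> omega

-- bucket count at j (1 ≤ j < n) is the number of elements equal to j

theorem bucket_mid (T : List Int) (n j : Nat) (h1 : 1 ≤ j) (h2 : j < n) :
    T.countP (fun v => decide (1 ≤ v ∧ (if v < (n:Int) then v.toNat else n) = j))
      = T.countP (fun v => decide (v = (j:Int))) := by
  apply List.countP_congr
  intro v _
  simp only [decide_eq_true_eq]
  constructor
  · rintro ⟨hv, hb⟩
    split_ifs at hb with hvn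
    · omega
    · omega
  · rintro rfl
    refine ⟨by exact_mod_cast h1, ?_⟩
    rw [if_pos (by exact_mod_cast h2)]
    omega

-- bucket count at n is the number of elements > n-1

theorem bucket_top (T : List Int) (n : Nat) (hn : 1 ≤ n) :
    T.countP (fun v => decide (1 ≤ v ∧ (if v < (n:Int) then v.toNat else n) = n))
      = cntGT T ((n-1:Nat):Int) := by
  apply List.countP_congr
  intro v _
  simp only [decide_eq_true_eq]
  constructor
  · rintro ⟨hv, hb⟩
    split_ifs at hb with hvn
    · omega
    · push_cast [Nat.cast_sub hn]; omega
  · intro h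
    have hcast : ((n-1:Nat):Int) = (n:Int) - 1 := by push_cast [Nat.cast_sub hn]; ring
    rw [hcast] at h
    refine ⟨by omega, ?_⟩
    rw [if_neg (by omega)]

-- the descending-chain fact: cntGT (j) + #{= j+1} = cntGT (j-1)... stated ascending

theorem cntGT_chain (T : List Int) (j : Int) :
    cntGT T j = cntGT T (j+1) + T.countP (fun v => decide (v = j+1)) := by
  apply countP_split
  · intro v
    rw [← Bool.decide_or]
    simp only [decide_eq_decide]
    omega
  · intro v; simp; omega

theorem scan_fold (T : List Int) (n : Nat) (CNT : List Int) :
    ∀ (m : Nat) (l0 : Nat) (g0 : Int), m ≤ n →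
    (1 ≤ m → g0 + CNT.getD m 0 = (cntGT T ((m-1:Nat):Int) : Int)) →
    (∀ k, 1 ≤ k → k < m →
      (cntGT T (k:Int) : Int) + CNT.getD k 0 = (cntGT T ((k-1:Nat):Int) : Int)) →
    (((List.range m).reverse).foldl
      (fun (s : Int × Nat) k =>
        (s.1 + CNT.getD (k+1) 0, if s.1 + CNT.getD (k+1) 0 ≤ (k:Int) then k else s.2))
      (g0, l0)).2 = bestL T m l0 := by
  intro m
  induction m with
  | zero => intro l0 g0 _ _ _; simp [bestL]
  | succ m ih =>
    intro l0 g0 hmn hg hchain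
    have hrev : (List.range (m+1)).reverse = m :: (List.range m).reverse := by
      rw [List.range_succ, List.reverse_append]
      rfl
    rw [hrev, List.foldl_cons]
    simp only []
    have hg1 : g0 + CNT.getD (m+1) 0 = (cntGT T (m:Int) : Nat) := by
      have := hg (by omega)
      simpa using this
    have hcond : (g0 + CNT.getD (m+1) 0 ≤ (m:Int)) ↔ (cntGT T (m:Int) ≤ m) := by
      rw [hg1]
      exact_mod_cast Iff.rfl
    have hbranch : (if g0 + CNT.getD (m+1) 0 ≤ (m:Int) then m else l0)
        = (if cntGT T (m:Int) ≤ m then m else l0) := by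
      split_ifs with h1 h2
      · rfl
      · exact absurd (hcond.mp h1) h2
      · exact absurd (hcond.mpr ‹_›) h1
      · rfl
    rw [hbranch]
    rw [bestL]
    by_cases hm : 1 ≤ m
    · exact ih _ _ (by omega)
        (fun _ => by rw [hg1]; exact hchain m hm (by omega))
        (fun k h1 h2 => hchain k h1 (by omega))
    · have : m = 0 := by omega
      subst this
      simp [bestL]

theorem bestL_notfound (T : List Int) :
    ∀ (m l0 : Nat), (∀ k, k < m → ¬ (cntGT T (k:Int) ≤ k)) → bestL T m l0 = l0 := by
  intro m
  induction m with
  | zero => intro l0 _; rfl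
  | succ m ih =>
    intro l0 h
    rw [bestL, if_neg (h m (by omega))]
    exact ih l0 (fun k hk => h k (by omega))

theorem bestL_found (T : List Int) (hex : ∃ k : Nat, cntGT T (k:Int) ≤ k) :
    ∀ (m l0 : Nat), (∃ k, k < m ∧ cntGT T (k:Int) ≤ k) → bestL T m l0 = Nat.find hex := by
  intro m
  induction m with
  | zero => rintro l0 ⟨k, hk, _⟩; omega
  | succ m ih =>
    rintro l0 ⟨k, hk, hCk⟩
    by_cases hm : ∃ k', k' < m ∧ cntGT T (k':Int) ≤ k'
    · rw [bestL]
      exact ih _ hm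
    · have hkm : k = m := by
        rcases Nat.lt_or_ge k m with h | h
        · exact absurd ⟨k, h, hCk⟩ hm
        · omega
      subst hkm
      rw [bestL, if_pos hCk]
      rw [bestL_notfound T k k (fun k' hk' hC => hm ⟨k', hk', hC⟩)]
      symm
      rw [Nat.find_eq_iff]
      exact ⟨hCk, fun k' hk' hC => hm ⟨k', hk', hC⟩⟩

theorem pair_fold (c : Int) :
    ∀ (U : List Int) (a b : Int),
    U.foldl (fun (s : Int × Int) v => if c < v then (s.1 + v, s.2 + 1) else s) (a, b)
      = (a + (U.filter (fun v => decide (c < v))).sum, b + (U.countP (fun v => decide (c < v)) : Int)) := by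
  intro U
  induction U with
  | nil => intro a b; simp
  | cons v U ih =>
    intro a b
    rw [List.foldl_cons, List.filter_cons, List.countP_cons]
    by_cases h : c < v
    · rw [if_pos h, ih]
      simp [h]
      constructor
      · ring
      · push_cast; ring
    · rw [if_neg h, ih]
      simp [h]


theorem cntGT_le_length (T : List Int) (k : Int) : cntGT T k ≤ T.length :=
  List.countP_le_length ..

-- ===== VERDICT (by name: the statement is the Claim_ definition above) =====
theorem ice_cream_spec : Claim_equal_ice_cream := by
  unfold Claim_equal_ice_cream Spec_ice_cream
  intro T _
  -- the common crossing point L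
  have hex : ∃ k : Nat, cntGT T (k:Int) ≤ k :=
    ⟨T.length, by simpa using cntGT_le_length T (T.length:Int)⟩
  -- ===== A side =====
  have hA : ice_cream T =
      ((pvLoop (T.length+1) T.length T 0 T.length).1.take
        (pvLoop (T.length+1) T.length T 0 T.length).2).sum
      - (PySem.List.pyRange 0 ((pvLoop (T.length+1) T.length T 0 T.length).2:Int) 1).sum := rfl
  obtain ⟨hp, hlen, hsplit, hbelow, hCl, hle⟩ :=
    loop_spec T (T.length+1) 0 T.length T (le_refl _) (by omega) (List.Perm.refl _) rfl
      (by omega) (fun k hk => absurd hk (by omega))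
      (by simpa using cntGT_le_length T (T.length:Int))
      (fun _ => fun u hu w hw => absurd hw (by simp))
  set lf := (pvLoop (T.length+1) T.length T 0 T.length).2 with hlf
  set X := (pvLoop (T.length+1) T.length T 0 T.length).1 with hX
  have hlfL : lf = Nat.find hex := by
    symm
    rw [Nat.find_eq_iff]
    exact ⟨hCl, fun k hk hC => hbelow k hk hC⟩
  rw [hA, pyRange_sum, sum_take_eq T X lf hp hlen hsplit hle hCl hbelow]
  -- ===== B side =====
  simp only [ice_cream_alt]
  set CNT := T.foldl
    (fun (cnt : List Int) v =>
      if 1 ≤ v then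
        let j := if v < (T.length:Int) then v.toNat else T.length
        cnt.set j (cnt.getD j 0 + 1)
      else cnt) (List.replicate (T.length+1) 0) with hCNT
  set glP := ((List.range T.length).reverse).foldl
    (fun (s : Int × Nat) k =>
      (s.1 + CNT.getD (k+1) 0, if s.1 + CNT.getD (k+1) 0 ≤ (k:Int) then k else s.2))
    (0, T.length) with hglP
  -- bucket values
  have hget : ∀ j, j ≤ T.length → CNT.getD j 0
      = (T.countP (fun v => decide (1 ≤ v ∧ (if v < (T.length:Int) then v.toNat else T.length) = j)) : Int) := by
    intro j hj
    have := cnt_build T.length T (List.replicate (T.length+1) 0) (by simp) j hj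
    rw [hCNT, this, List.getD_replicate]
    · ring
    · omega
  -- the scan finds L
  have hglP2 : glP.2 = Nat.find hex := by
    rw [hglP, scan_fold T T.length CNT T.length T.length 0 (le_refl _) ?hg ?hchain]
    case hg =>
      intro hn1
      rw [hget T.length (le_refl _), bucket_top T T.length hn1]
      ring
    case hchain =>
      intro k h1 h2
      rw [hget k (by omega), bucket_mid T T.length k h1 h2]
      have hc : ((k-1:Nat):Int) + 1 = (k:Int) := by push_cast [Nat.cast_sub h1]; ring
      have := cntGT_chain T ((k-1:Nat):Int)
      rw [hc] at this
      push_cast [this]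
      ring
    by_cases hex2 : ∃ k, k < T.length ∧ cntGT T (k:Int) ≤ k
    · exact bestL_found T hex T.length T.length hex2
    · rw [bestL_notfound T T.length T.length (fun k hk hC => hex2 ⟨k, hk, hC⟩)]
      symm
      rw [Nat.find_eq_iff]
      exact ⟨by simpa using cntGT_le_length T (T.length:Int),
        fun k hk hC => hex2 ⟨k, hk, hC⟩⟩
  rw [pair_fold]
  rw [hglP2, hlfL]
  set L := Nat.find hex with hLdef
  have hcnt : (T.countP (fun v => decide ((L:Int) < v)) : Int) = (cntGT T (L:Int) : Int) := rfl
  rw [hcnt]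
  ring
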